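-- pv_equiv track=rewrite | github.com/Intiserahmed/GlimpseUI | clients/ios_client.py | find_in_tree
-- ===== SOURCE A (Python) =====
-- def find_in_tree(prompt: str, elements: list) -> dict | None:
--     """
--     Fuzzy-find element in accessibility tree by natural language prompt.
--     Priority: exact → contains → partial word match.
--     """
--     if not prompt or not elements:
--         return None
--     p = prompt.lower().strip()
--     # 1. Exact match
--     for el in elements:
--         label = el.get("label", "").lower()
--         ident = el.get("identifier", "").lower()
--         if p == label or p == ident:
--             return el
--     # 2. Prompt contained in label
--     for el in elements:
--         label = el.get("label", "").lower()
--         ident = el.get("identifier", "").lower()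
--         if p in label or p in ident:
--             return el
--     # 3. Label contained in prompt
--     for el in elements:
--         label = el.get("label", "").lower()
--         ident = el.get("identifier", "").lower()
--         if label and label in p:
--             return el
--         if ident and ident in p:
--             return el
--     return None
-- ===== SOURCE B (Python) =====
-- def find_in_tree(prompt: str, elements: list) -> dict | None:
--     """Single-pass tier-tracking re-implementation: compute each element's best
--     matching tier (1 exact, 2 prompt-in-field, 3 field-in-prompt, 4 none) and
--     keep the first element of the lowest tier seen, returning early on tier 1."""
--     if not prompt or not elements:
--         return None
--     p = prompt.lower().strip()
--     best_tier = 4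
--     best_el = None
--     for el in elements:
--         label = el.get("label", "").lower()
--         ident = el.get("identifier", "").lower()
--         if p == label or p == ident:
--             return el
--         tier = 2 if (p in label or p in ident) else \
--                3 if ((label and label in p) or (ident and ident in p)) else 4
--         if tier < best_tier:
--             best_tier = tier
--             best_el = el
--     return best_el
-- ===== Notes on version B (the rewrite author's own statement) =====
-- stated objective: alternative
-- what changed: Replaced A's three sequential priority scans over the whole list by a single pass that computes each element's matching tier and tracks the first element of the lowest tier, returning early only on an exact match.
import Mathlib
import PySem

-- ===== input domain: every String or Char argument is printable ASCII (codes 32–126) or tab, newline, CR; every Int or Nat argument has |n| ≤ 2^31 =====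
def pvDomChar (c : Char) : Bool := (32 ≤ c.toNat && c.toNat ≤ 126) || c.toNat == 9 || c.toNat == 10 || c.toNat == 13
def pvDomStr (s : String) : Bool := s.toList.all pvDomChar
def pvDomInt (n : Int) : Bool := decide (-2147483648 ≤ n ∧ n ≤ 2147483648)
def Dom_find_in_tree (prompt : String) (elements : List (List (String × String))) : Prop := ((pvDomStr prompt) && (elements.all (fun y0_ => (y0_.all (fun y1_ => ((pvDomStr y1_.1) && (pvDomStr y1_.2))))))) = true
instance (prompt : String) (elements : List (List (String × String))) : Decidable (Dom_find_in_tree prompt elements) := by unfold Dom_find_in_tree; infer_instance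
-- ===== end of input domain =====

-- B is a single tier-tracking pass instead of A's three sequential priority scans (objective: alternative decomposition, same cost class).

-- ===== PORT A =====
-- A-side: the three sequential scans, each one structural recursion over elements.
def pvScan1 (p : String) : List (List (String × String)) → Option (List (String × String))
  | [] => none
  | el :: rest =>
    let label := PySem.Str.lower ((PySem.Dict.mk el).getD "label" "")
    let ident := PySem.Str.lower ((PySem.Dict.mk el).getD "identifier" "")
    if p == label || p == ident then some el else pvScan1 p rest

def pvScan2 (p : String) : List (List (String × String)) → Option (List (String × String))
  | [] => none
  | el :: rest =>
    let label := PySem.Str.lower ((PySem.Dict.mk el).getD "label" "")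
    let ident := PySem.Str.lower ((PySem.Dict.mk el).getD "identifier" "")
    if PySem.Str.isIn p label || PySem.Str.isIn p ident then some el else pvScan2 p rest

def pvScan3 (p : String) : List (List (String × String)) → Option (List (String × String))
  | [] => none
  | el :: rest =>
    let label := PySem.Str.lower ((PySem.Dict.mk el).getD "label" "")
    let ident := PySem.Str.lower ((PySem.Dict.mk el).getD "identifier" "")
    if !(label == "") && PySem.Str.isIn label p then some el
    else if !(ident == "") && PySem.Str.isIn ident p then some el
    else pvScan3 p rest

def find_in_tree (prompt : String) (elements : List (List (String × String))) : Option (List (String × String)) :=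
  if prompt == "" || elements.isEmpty then none
  else
    let p := PySem.Str.strip (PySem.Str.lower prompt)
    match pvScan1 p elements with
    | some el => some el
    | none =>
      match pvScan2 p elements with
      | some el => some el
      | none => pvScan3 p elements

-- ===== PORT B =====
-- B-side: one pass; tier = 2/3/4 per element, keep first element of the strictly lowest tier, early return on exact match.
def pvAltLoop (p : String) (bestTier : Nat) (bestEl : Option (List (String × String))) :
    List (List (String × String)) → Option (List (String × String))
  | [] => bestEl
  | el :: rest =>
    let label := PySem.Str.lower ((PySem.Dict.mk el).getD "label" "")
    let ident := PySem.Str.lower ((PySem.Dict.mk el).getD "identifier" "")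
    if p == label || p == ident then some el
    else
      let tier : Nat :=
        if PySem.Str.isIn p label || PySem.Str.isIn p ident then 2
        else if (!(label == "") && PySem.Str.isIn label p) || (!(ident == "") && PySem.Str.isIn ident p) then 3
        else 4
      if tier < bestTier then pvAltLoop p tier (some el) rest
      else pvAltLoop p bestTier bestEl rest

def find_in_tree_alt (prompt : String) (elements : List (List (String × String))) : Option (List (String × String)) :=
  if prompt == "" || elements.isEmpty then none
  else
    let p := PySem.Str.strip (PySem.Str.lower prompt)
    pvAltLoop p 4 none elements

-- ===== PRECONDITION & SPEC =====
def Spec_find_in_tree (prompt : String) (elements : List (List (String × String))) (out : Option (List (String × String))) : Prop := out = find_in_tree_alt prompt elements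
instance (prompt : String) (elements : List (List (String × String))) (out : Option (List (String × String))) : Decidable (Spec_find_in_tree prompt elements out) := by unfold Spec_find_in_tree; infer_instance

-- ===== CLAIM (what is proved, stated in full; the proofs are below) =====
def Claim_equal_find_in_tree : Prop := ∀ (prompt : String) (elements : List (List (String × String))), Dom_find_in_tree prompt elements → Spec_find_in_tree prompt elements (find_in_tree prompt elements)

-- ===== LEMMAS AND PROOFS =====

-- With bestTier = 2, only an exact match (tier 1) can still change the result.
lemma pvAltLoop_two (p : String) (e : List (String × String)) :
    ∀ xs, pvAltLoop p 2 (some e) xs =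
      (match pvScan1 p xs with | some e' => some e' | none => some e) := by
  intro xs
  induction xs with
  | nil => rfl
  | cons el rest ih =>
    simp only [pvAltLoop, pvScan1]
    set L := PySem.Str.lower ((PySem.Dict.mk el).getD "label" "") with hL
    set I := PySem.Str.lower ((PySem.Dict.mk el).getD "identifier" "") with hI
    by_cases h1 : (p = L ∨ p = I)
    · simp [h1]
    · by_cases h2 : (PySem.Chars.isIn p.toList L.toList = true ∨ PySem.Chars.isIn p.toList I.toList = true)
      · simp [h1, h2, ih]
      · by_cases h3 : (¬L = "" ∧ PySem.Chars.isIn L.toList p.toList = true ∨ ¬I = "" ∧ PySem.Chars.isIn I.toList p.toList = true)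
        · simp [h1, h2, h3, ih]
        · simp [h1, h2, h3, ih]

-- With bestTier = 3, a tier-2 element restarts the loop at bestTier 2.
lemma pvAltLoop_three (p : String) (e : List (String × String)) :
    ∀ xs, pvAltLoop p 3 (some e) xs =
      (match pvScan1 p xs with
       | some e' => some e'
       | none => match pvScan2 p xs with | some e' => some e' | none => some e) := by
  intro xs
  induction xs with
  | nil => rfl
  | cons el rest ih =>
    simp only [pvAltLoop, pvScan1, pvScan2]
    set L := PySem.Str.lower ((PySem.Dict.mk el).getD "label" "") with hL
    set I := PySem.Str.lower ((PySem.Dict.mk el).getD "identifier" "") with hI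
    by_cases h1 : (p = L ∨ p = I)
    · simp [h1]
    · by_cases h2 : (PySem.Chars.isIn p.toList L.toList = true ∨ PySem.Chars.isIn p.toList I.toList = true)
      · simp [h1, h2, pvAltLoop_two p el rest]
      · by_cases h3 : (¬L = "" ∧ PySem.Chars.isIn L.toList p.toList = true ∨ ¬I = "" ∧ PySem.Chars.isIn I.toList p.toList = true)
        · simp [h1, h2, h3, ih]
        · simp [h1, h2, h3, ih]

-- The full loop from the initial state equals A's three-scan cascade.
lemma pvAltLoop_four (p : String) :
    ∀ xs, pvAltLoop p 4 none xs =
      (match pvScan1 p xs with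
       | some e' => some e'
       | none => match pvScan2 p xs with
                 | some e' => some e'
                 | none => pvScan3 p xs) := by
  intro xs
  induction xs with
  | nil => rfl
  | cons el rest ih =>
    simp only [pvAltLoop, pvScan1, pvScan2, pvScan3]
    set L := PySem.Str.lower ((PySem.Dict.mk el).getD "label" "") with hL
    set I := PySem.Str.lower ((PySem.Dict.mk el).getD "identifier" "") with hI
    by_cases h1 : (p = L ∨ p = I)
    · simp [h1]
    · by_cases h2 : (PySem.Chars.isIn p.toList L.toList = true ∨ PySem.Chars.isIn p.toList I.toList = true)
      · simp [h1, h2, pvAltLoop_two p el rest]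
      · by_cases hl : (¬L = "" ∧ PySem.Chars.isIn L.toList p.toList = true)
        · simp [h1, h2, hl, pvAltLoop_three p el rest]
        · by_cases hi : (¬I = "" ∧ PySem.Chars.isIn I.toList p.toList = true)
          · simp [h1, h2, hl, hi, pvAltLoop_three p el rest]
          · simp [h1, h2, hl, hi, ih]
-- ===== VERDICT (by name: the statement is the Claim_ definition above) =====
theorem find_in_tree_spec : Claim_equal_find_in_tree := by
  intro prompt elements _
  unfold Spec_find_in_tree find_in_tree find_in_tree_alt
  split_ifs with h
  · rfl
  · exact (pvAltLoop_four _ elements).symm
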